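-- pv_equiv track=rewrite | github.com/no-logo/ITStepZadaniaDomowe | Generators_Part_1.py | calculate_word_value
-- ===== SOURCE A (Python) =====
-- def calculate_word_value(word):
--     vowels = set('aeiou')
--     consonants = set('bcdfghjklmnpqrstvwyz')
--
--     value = 0
--
--     for letter in word:
--         if letter.lower() in vowels:
--             value += 3
--         elif letter.lower() in consonants:
--             value += 1
--         elif letter.lower() == 'x':
--             value += 10
--     return value
-- ===== SOURCE B (Python) =====
-- def calculate_word_value(word):
--     counts = {}
--     for ch in word.lower():
--         counts[ch] = counts.get(ch, 0) + 1
--     return (3 * sum(counts.get(v, 0) for v in 'aeiou')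
--             + sum(counts.get(c, 0) for c in 'bcdfghjklmnpqrstvwyz')
--             + 10 * counts.get('x', 0))
-- ===== Notes on version B (the rewrite author's own statement) =====
-- stated objective: alternative
-- what changed: B first builds a character-frequency dict over the lowercased word and then combines the counts arithmetically (3*vowel counts + consonant counts + 10*count of 'x'), instead of A's single scan with a per-character if/elif cascade accumulating the score.
import Mathlib
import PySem

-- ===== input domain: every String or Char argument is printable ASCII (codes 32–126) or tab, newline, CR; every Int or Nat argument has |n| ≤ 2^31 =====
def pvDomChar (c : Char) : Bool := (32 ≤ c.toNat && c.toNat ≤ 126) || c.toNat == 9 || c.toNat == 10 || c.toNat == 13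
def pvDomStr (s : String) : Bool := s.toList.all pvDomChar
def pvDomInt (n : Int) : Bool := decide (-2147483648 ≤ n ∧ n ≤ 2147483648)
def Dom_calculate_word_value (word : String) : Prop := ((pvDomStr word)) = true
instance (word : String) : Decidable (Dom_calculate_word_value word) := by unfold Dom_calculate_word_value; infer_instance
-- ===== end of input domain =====

-- B counts characters of the lowercased word into a frequency dict first and then combines the counts arithmetically.

-- ===== PORT A =====
def calculate_word_value (word : String) : Int :=
  let vowels := PySem.Set.ofList "aeiou".toList
  let consonants := PySem.Set.ofList "bcdfghjklmnpqrstvwyz".toList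
  word.toList.foldl
    (fun value letter =>
      if vowels.contains (PySem.Chars.lowerChar letter) then value + 3
      else if consonants.contains (PySem.Chars.lowerChar letter) then value + 1
      else if PySem.Chars.lowerChar letter == 'x' then value + 10
      else value) 0

-- ===== PORT B =====
def calculate_word_value_alt (word : String) : Int :=
  let counts : PySem.Dict Char Int :=
    (PySem.Str.lower word).toList.foldl (fun d ch => d.insert ch (d.getD ch 0 + 1)) PySem.Dict.empty
  3 * ("aeiou".toList.map (fun v => counts.getD v 0)).sum
    + ("bcdfghjklmnpqrstvwyz".toList.map (fun c => counts.getD c 0)).sum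
    + 10 * counts.getD 'x' 0

-- ===== PRECONDITION & SPEC =====
def Spec_calculate_word_value (word : String) (out : Int) : Prop := out = calculate_word_value_alt word
instance (word : String) (out : Int) : Decidable (Spec_calculate_word_value word out) := by unfold Spec_calculate_word_value; infer_instance

-- ===== CLAIM (what is proved, stated in full; the proofs are below) =====
def Claim_equal_calculate_word_value : Prop := ∀ (word : String), Dom_calculate_word_value word → Spec_calculate_word_value word (calculate_word_value word)

-- ===== LEMMAS AND PROOFS =====

lemma pv_set_contains (L : List Char) (c : Char) :
    PySem.Set.contains L c = L.contains c := by
  simp [PySem.Set.contains]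

-- per-character score of the already-lowercased character
def pvScore (c : Char) : Int :=
  if ("aeiou".toList).contains c then 3
  else if ("bcdfghjklmnpqrstvwyz".toList).contains c then 1
  else if c == 'x' then 10 else 0

lemma pv_A_fold (l : List Char) (acc : Int) :
    l.foldl
      (fun value letter =>
        if (PySem.Set.ofList "aeiou".toList).contains (PySem.Chars.lowerChar letter) then value + 3
        else if (PySem.Set.ofList "bcdfghjklmnpqrstvwyz".toList).contains (PySem.Chars.lowerChar letter) then value + 1
        else if PySem.Chars.lowerChar letter == 'x' then value + 10
        else value) acc
    = acc + (l.map (fun x => pvScore (PySem.Chars.lowerChar x))).sum := by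
  induction l generalizing acc with
  | nil => simp
  | cons a l ih =>
    rw [List.foldl_cons, ih]
    have hV : PySem.Set.ofList "aeiou".toList = "aeiou".toList := by decide
    have hC : PySem.Set.ofList "bcdfghjklmnpqrstvwyz".toList = "bcdfghjklmnpqrstvwyz".toList := by decide
    rw [hV, hC]
    simp only [List.map_cons, List.sum_cons, pv_set_contains, pvScore]
    split_ifs <;> ring

lemma pv_sum_indicator (c : Char) (L : List Char) (h : L.Nodup) :
    (L.map (fun v => if c = v then (1 : Int) else 0)).sum = if L.contains c then 1 else 0 := by
  induction L with
  | nil => simp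
  | cons a L ih =>
    rcases List.nodup_cons.mp h with ⟨ha, hL⟩
    simp only [List.map_cons, List.sum_cons, ih hL]
    by_cases hca : c = a
    · subst hca
      simp [List.contains_eq_mem, (by simpa using ha : c ∉ L)]
    · simp [hca]

lemma pv_head (c : Char) :
    3 * (("aeiou".toList.map (fun v => if c = v then (1 : Int) else 0)).sum)
      + ("bcdfghjklmnpqrstvwyz".toList.map (fun v => if c = v then (1 : Int) else 0)).sum
      + 10 * (if c = 'x' then (1 : Int) else 0)
    = pvScore c := by
  rw [pv_sum_indicator c _ (by decide), pv_sum_indicator c _ (by decide)]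
  unfold pvScore
  by_cases hv : ("aeiou".toList).contains c
  · have h : c = 'a' ∨ c = 'e' ∨ c = 'i' ∨ c = 'o' ∨ c = 'u' := by
      have hm : c ∈ ['a', 'e', 'i', 'o', 'u'] := by
        have e : "aeiou".toList = ['a', 'e', 'i', 'o', 'u'] := by decide
        rw [e] at hv; simpa using hv
      simpa [List.mem_cons] using hm
    rcases h with rfl | rfl | rfl | rfl | rfl <;> decide
  · by_cases hc : ("bcdfghjklmnpqrstvwyz".toList).contains c
    · have h : c = 'b' ∨ c = 'c' ∨ c = 'd' ∨ c = 'f' ∨ c = 'g' ∨ c = 'h' ∨ c = 'j' ∨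
          c = 'k' ∨ c = 'l' ∨ c = 'm' ∨ c = 'n' ∨ c = 'p' ∨ c = 'q' ∨ c = 'r' ∨ c = 's' ∨
          c = 't' ∨ c = 'v' ∨ c = 'w' ∨ c = 'y' ∨ c = 'z' := by
        have hm : c ∈ ['b', 'c', 'd', 'f', 'g', 'h', 'j', 'k', 'l', 'm', 'n', 'p', 'q', 'r',
            's', 't', 'v', 'w', 'y', 'z'] := by
          have e : "bcdfghjklmnpqrstvwyz".toList = ['b', 'c', 'd', 'f', 'g', 'h', 'j', 'k',
              'l', 'm', 'n', 'p', 'q', 'r', 's', 't', 'v', 'w', 'y', 'z'] := by decide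
          rw [e] at hc; simpa using hc
        simpa [List.mem_cons] using hm
      rcases h with rfl | rfl | rfl | rfl | rfl | rfl | rfl | rfl | rfl | rfl | rfl | rfl |
        rfl | rfl | rfl | rfl | rfl | rfl | rfl | rfl <;> decide
    · simp only [hv, hc, if_false, Bool.false_eq_true, beq_iff_eq]
      split_ifs <;> ring

lemma pv_B_sum (ls : List Char) :
    3 * (("aeiou".toList.map (fun v => (ls.count v : Int))).sum)
      + ("bcdfghjklmnpqrstvwyz".toList.map (fun v => (ls.count v : Int))).sum
      + 10 * (ls.count 'x' : Int)
    = (ls.map pvScore).sum := by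
  induction ls with
  | nil => simp
  | cons a ls ih =>
    have hcount : ∀ v : Char, ((a :: ls).count v : Int)
        = (if a = v then (1 : Int) else 0) + (ls.count v : Int) := by
      intro v
      by_cases h : a = v <;> simp [h] <;> omega
    simp only [hcount, List.map_cons, List.sum_cons]
    have expand : ∀ L : List Char,
        (L.map (fun v => (if a = v then (1 : Int) else 0) + (ls.count v : Int))).sum
        = (L.map (fun v => if a = v then (1 : Int) else 0)).sum
          + (L.map (fun v => (ls.count v : Int))).sum := by
      intro L; induction L with
      | nil => simp
      | cons b L ihL => simp [ihL]; ring
    rw [expand, expand]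
    have := pv_head a
    linarith [ih, pv_head a]

lemma pv_getD_counts (ls : List Char) (v : Char) :
    (ls.foldl (fun d ch => d.insert ch (d.getD ch 0 + 1)) (PySem.Dict.empty : PySem.Dict Char Int)).getD v 0
      = (ls.count v : Int) := by
  rw [PySem.Dict.getD_foldl_insert_add_one]
  simp

-- ===== VERDICT (by name: the statement is the Claim_ definition above) =====
theorem calculate_word_value_spec : Claim_equal_calculate_word_value := by
  intro word _
  unfold Spec_calculate_word_value calculate_word_value calculate_word_value_alt
  simp only [pv_A_fold, pv_getD_counts, zero_add, PySem.Str.toList_lower]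
  rw [pv_B_sum (PySem.Chars.lower word.toList)]
  simp only [PySem.Chars.lower, List.map_map]
  rfl
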